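-- pv_equiv track=rewrite | github.com/aws-solutions-library-samples/guidance-for-aws-deepracer-event-management | lib/lambdas/race_api/index.py | __get_most_concecutive_laps
-- ===== SOURCE A (Python) =====
-- def __get_most_concecutive_laps(races: list) -> int:
--     most_concecutive_laps_over_all_races = []
--     for race in races:
--         most_concecutive_laps_of_race = 0
--         for lap in race["laps"]:
--             if bool(lap["isValid"]):
--                 most_concecutive_laps_of_race += 1
--             else:
--                 most_concecutive_laps_over_all_races.append(
--                     most_concecutive_laps_of_race
--                 )
--                 most_concecutive_laps_of_race = 0
--         most_concecutive_laps_over_all_races.append(most_concecutive_laps_of_race)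
--
--     return max(most_concecutive_laps_over_all_races)
-- ===== SOURCE B (Python) =====
-- def __get_most_concecutive_laps(races: list) -> int:
--     return max(__longest_valid_run(race) for race in races)
--
--
-- def __longest_valid_run(race) -> int:
--     valid = [bool(lap["isValid"]) for lap in race["laps"]]
--     cuts = [-1] + [i for i, v in enumerate(valid) if not v] + [len(valid)]
--     return max(b - a - 1 for a, b in zip(cuts, cuts[1:]))
-- ===== Notes on version B (the rewrite author's own statement) =====
-- stated objective: idiomatic
-- what changed: Replaces the flat shared run-length list with explicit counter/reset by a two-level maximum: per race, the longest valid run is computed as the largest gap between consecutive invalid-lap positions (with sentinels -1 and len), and the result is the max of these per-race values.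
import Mathlib
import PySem

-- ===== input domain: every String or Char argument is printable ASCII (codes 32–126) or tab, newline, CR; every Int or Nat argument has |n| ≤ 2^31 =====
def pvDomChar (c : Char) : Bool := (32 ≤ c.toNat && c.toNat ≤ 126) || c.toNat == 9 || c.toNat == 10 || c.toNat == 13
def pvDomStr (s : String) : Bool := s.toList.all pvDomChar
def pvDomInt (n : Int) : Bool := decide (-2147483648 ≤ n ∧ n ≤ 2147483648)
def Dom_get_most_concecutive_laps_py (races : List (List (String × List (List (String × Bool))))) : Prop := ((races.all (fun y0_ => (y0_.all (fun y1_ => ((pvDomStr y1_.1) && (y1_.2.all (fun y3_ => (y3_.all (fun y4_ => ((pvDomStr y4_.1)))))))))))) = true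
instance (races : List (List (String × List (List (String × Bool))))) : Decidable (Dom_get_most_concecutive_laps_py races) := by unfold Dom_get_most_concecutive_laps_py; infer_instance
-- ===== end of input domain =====

-- B computes the answer as a two-level max (per race, largest gap between consecutive
-- invalid-lap positions with sentinels) instead of A's flat shared run-length list; idiomatic decomposition, same cost.


-- ===== PORT A =====
def get_most_concecutive_laps_py (races : List (List (String × List (List (String × Bool))))) : Int :=
  let all : List Int := races.foldl (fun (acc : List Int) race =>
    let p : List Int × Int :=
      (PySem.Dict.getD (PySem.Dict.mk race) "laps" ([] : List (List (String × Bool)))).foldl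
        (fun (st : List Int × Int) lap =>
          if PySem.Dict.getD (PySem.Dict.mk lap) "isValid" false then (st.1, st.2 + 1)
          else (st.1 ++ [st.2], 0))
        (acc, 0)
    p.1 ++ [p.2]) []
  (PySem.List.max? all (fun y => y)).getD 0   -- Python max(all); Pre_ guarantees all ≠ []

-- ===== PORT B =====
def longest_valid_run_alt (race : List (String × List (List (String × Bool)))) : Int :=
  let valid : List Bool :=
    (PySem.Dict.getD (PySem.Dict.mk race) "laps" ([] : List (List (String × Bool)))).map
      (fun lap => PySem.Dict.getD (PySem.Dict.mk lap) "isValid" false)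
  let cuts : List Int :=
    [(-1 : Int)] ++ ((PySem.List.enumerate valid 0).filter (fun p => !p.2)).map (·.1)
      ++ [(valid.length : Int)]
  let diffs : List Int := (cuts.zip cuts.tail).map (fun p => p.2 - p.1 - 1)
  (PySem.List.max? diffs (fun y => y)).getD 0   -- diffs is provably nonempty (cuts has ≥ 2 elements)

def get_most_concecutive_laps_py_alt (races : List (List (String × List (List (String × Bool))))) : Int :=
  (PySem.List.max? (races.map longest_valid_run_alt) (fun y => y)).getD 0   -- Python max(gen); Pre_ guarantees races ≠ []

-- ===== PRECONDITION & SPEC =====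
-- Pre_ excludes exactly the inputs on which the Python A raises: empty `races` (ValueError from
-- max([])) and races/laps missing the "laps"/"isValid" keys (KeyError).
def Pre_get_most_concecutive_laps_py (races : List (List (String × List (List (String × Bool))))) : Prop :=
  races ≠ [] ∧ ∀ race ∈ races,
    (PySem.Dict.get? (PySem.Dict.mk race) "laps").isSome = true ∧
    ∀ lap ∈ PySem.Dict.getD (PySem.Dict.mk race) "laps" ([] : List (List (String × Bool))),
      (PySem.Dict.get? (PySem.Dict.mk lap) "isValid").isSome = true
instance (races : List (List (String × List (List (String × Bool))))) : Decidable (Pre_get_most_concecutive_laps_py races) := by unfold Pre_get_most_concecutive_laps_py; infer_instance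

def pvWitness_get_most_concecutive_laps_py : (List (List (String × List (List (String × Bool))))) :=
  [[("laps", [[("isValid", true)], [("isValid", false)]])]]

def Spec_get_most_concecutive_laps_py (races : List (List (String × List (List (String × Bool))))) (out : Int) : Prop := out = get_most_concecutive_laps_py_alt races
instance (races : List (List (String × List (List (String × Bool))))) (out : Int) : Decidable (Spec_get_most_concecutive_laps_py races out) := by unfold Spec_get_most_concecutive_laps_py; infer_instance

-- ===== CLAIM (what is proved, stated in full; the proofs are below) =====
def Claim_equal_get_most_concecutive_laps_py : Prop := ∀ (races : List (List (String × List (List (String × Bool))))), Dom_get_most_concecutive_laps_py races → Pre_get_most_concecutive_laps_py races → Spec_get_most_concecutive_laps_py races (get_most_concecutive_laps_py races)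

-- ===== LEMMAS AND PROOFS =====

-- run-length segments of a boolean list, current counter c (the values A appends for one race)
def pvSeg : List Bool → Int → List Int
  | [], c => [c]
  | true :: bs, c => pvSeg bs (c + 1)
  | false :: bs, c => c :: pvSeg bs 0

-- successive differences minus one, from a previous sentinel
def pvDiffs : Int → List Int → List Int
  | _, [] => []
  | prev, x :: xs => (x - prev - 1) :: pvDiffs x xs

theorem pvSeg_ne_nil (bs : List Bool) (c : Int) : pvSeg bs c ≠ [] := by
  induction bs generalizing c with
  | nil => simp [pvSeg]
  | cons b bs ih => cases b <;> simp [pvSeg, ih]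

theorem pv_zip_tail_diffs (x : Int) (l : List Int) :
    ((x :: l).zip l).map (fun p => p.2 - p.1 - 1) = pvDiffs x l := by
  induction l generalizing x with
  | nil => simp [pvDiffs]
  | cons y ys ih => simp [pvDiffs, ih]

theorem pv_diffs_pos (bs : List Bool) (k prev : Int) :
    pvDiffs prev
      ((((PySem.List.enumerate bs k).filter (fun p => !p.2)).map (·.1)) ++ [k + (bs.length : Int)])
      = pvSeg bs (k - prev - 1) := by
  induction bs generalizing k prev with
  | nil => simp [PySem.List.enumerate_nil, pvDiffs, pvSeg]
  | cons b bs ih =>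
    cases b with
    | true =>
      have h := ih (k + 1) prev
      simp only [PySem.List.enumerate_cons, List.filter_cons, Bool.not_true,
        Bool.false_eq_true, if_false, List.length_cons, Nat.cast_add, Nat.cast_one, pvSeg]
      rw [show k + ((bs.length : Int) + 1) = (k + 1) + (bs.length : Int) by ring, h]
      congr 1; ring
    | false =>
      have h := ih (k + 1) k
      simp only [PySem.List.enumerate_cons, List.filter_cons, Bool.not_false, if_pos,
        List.length_cons, Nat.cast_add, Nat.cast_one, pvSeg, List.map_cons,
        List.cons_append, pvDiffs]
      rw [show k + ((bs.length : Int) + 1) = (k + 1) + (bs.length : Int) by ring, h]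
      norm_num

-- the inner loop of A over one race's laps, started from (acc, c), flushes acc ++ pvSeg
theorem pv_inner_fold (laps : List (List (String × Bool))) (acc : List Int) (c : Int) :
    (laps.foldl
        (fun (st : List Int × Int) lap =>
          if PySem.Dict.getD (PySem.Dict.mk lap) "isValid" false then (st.1, st.2 + 1)
          else (st.1 ++ [st.2], 0)) (acc, c)).1
      ++ [(laps.foldl
        (fun (st : List Int × Int) lap =>
          if PySem.Dict.getD (PySem.Dict.mk lap) "isValid" false then (st.1, st.2 + 1)
          else (st.1 ++ [st.2], 0)) (acc, c)).2]
    = acc ++ pvSeg (laps.map (fun lap => PySem.Dict.getD (PySem.Dict.mk lap) "isValid" false)) c := by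
  induction laps generalizing acc c with
  | nil => simp [pvSeg]
  | cons lap laps ih =>
    by_cases h : PySem.Dict.getD (PySem.Dict.mk lap) "isValid" false = true
    · simpa [h, pvSeg] using ih acc (c + 1)
    · simp only [Bool.not_eq_true] at h
      simpa [h, pvSeg] using ih (acc ++ [c]) 0

theorem pv_foldl_max_comm (t : List Int) (a x : Int) :
    t.foldl max (max a x) = max a (t.foldl max x) := by
  induction t generalizing x with
  | nil => simp
  | cons y ys ih => simp only [List.foldl_cons, max_assoc, ih]

theorem pv_flat_max (f : List (String × List (List (String × Bool))) → List Int)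
    (hne : ∀ r, f r ≠ [])
    (races : List (List (String × List (List (String × Bool))))) (a : Int) :
    (races.flatMap f).foldl max a
      = (races.map (fun r => (PySem.List.max? (f r) (fun y => y)).getD 0)).foldl max a := by
  induction races generalizing a with
  | nil => simp
  | cons r rs ih =>
    simp only [List.flatMap_cons, List.map_cons, List.foldl_cons, List.foldl_append]
    rw [ih]
    congr 1
    obtain ⟨x, t, hxt⟩ := List.exists_cons_of_ne_nil (hne r)
    rw [hxt]
    rw [PySem.List.max?_id_cons]
    simp only [List.foldl_cons, Option.getD_some]
    exact pv_foldl_max_comm t a x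

-- B's per-race value equals the max of pvSeg over that race's validity list
theorem pv_per_race (race : List (String × List (List (String × Bool)))) :
    longest_valid_run_alt race
      = (PySem.List.max?
          (pvSeg ((PySem.Dict.getD (PySem.Dict.mk race) "laps" ([] : List (List (String × Bool)))).map
              (fun lap => PySem.Dict.getD (PySem.Dict.mk lap) "isValid" false)) 0)
          (fun y => y)).getD 0 := by
  unfold longest_valid_run_alt
  simp only [List.cons_append, List.nil_append, List.tail_cons]
  rw [pv_zip_tail_diffs]
  have h := pv_diffs_pos
    ((PySem.Dict.getD (PySem.Dict.mk race) "laps" ([] : List (List (String × Bool)))).map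
      (fun lap => PySem.Dict.getD (PySem.Dict.mk lap) "isValid" false)) 0 (-1)
  simp only [zero_add, List.length_map] at h ⊢
  rw [h]
  norm_num

-- A's flat list is the concatenation of the per-race segment lists
theorem pv_a_list (races : List (List (String × List (List (String × Bool))))) (l : List Int) :
    races.foldl (fun (acc : List Int) race =>
      ((PySem.Dict.getD (PySem.Dict.mk race) "laps" ([] : List (List (String × Bool)))).foldl
          (fun (st : List Int × Int) lap =>
            if PySem.Dict.getD (PySem.Dict.mk lap) "isValid" false then (st.1, st.2 + 1)
            else (st.1 ++ [st.2], 0)) (acc, 0)).1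
        ++ [((PySem.Dict.getD (PySem.Dict.mk race) "laps" ([] : List (List (String × Bool)))).foldl
          (fun (st : List Int × Int) lap =>
            if PySem.Dict.getD (PySem.Dict.mk lap) "isValid" false then (st.1, st.2 + 1)
            else (st.1 ++ [st.2], 0)) (acc, 0)).2]) l
    = l ++ races.flatMap (fun race =>
        pvSeg ((PySem.Dict.getD (PySem.Dict.mk race) "laps" ([] : List (List (String × Bool)))).map
          (fun lap => PySem.Dict.getD (PySem.Dict.mk lap) "isValid" false)) 0) := by
  induction races generalizing l with
  | nil => simp
  | cons r rs ih =>
    simp only [List.foldl_cons, List.flatMap_cons]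
    rw [pv_inner_fold, ih, List.append_assoc]

-- ===== VERDICT (by name: the statement is the Claim_ definition above) =====
theorem get_most_concecutive_laps_py_spec : Claim_equal_get_most_concecutive_laps_py := by
  intro races _ hpre
  unfold Spec_get_most_concecutive_laps_py get_most_concecutive_laps_py get_most_concecutive_laps_py_alt
  obtain ⟨hne, -⟩ := hpre
  simp only
  rw [pv_a_list races []]
  simp only [List.nil_append]
  obtain ⟨r, rs, hrr⟩ := List.exists_cons_of_ne_nil hne
  subst hrr
  set f : List (String × List (List (String × Bool))) → List Int := fun race =>
    pvSeg ((PySem.Dict.getD (PySem.Dict.mk race) "laps" ([] : List (List (String × Bool)))).map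
      (fun lap => PySem.Dict.getD (PySem.Dict.mk lap) "isValid" false)) 0 with hf
  have hfne : ∀ r, f r ≠ [] := fun r => pvSeg_ne_nil _ _
  have hper : ∀ race, longest_valid_run_alt race = (PySem.List.max? (f race) (fun y => y)).getD 0 :=
    fun race => pv_per_race race
  simp only [List.flatMap_cons, List.map_cons]
  obtain ⟨x, t, hxt⟩ := List.exists_cons_of_ne_nil (hfne r)
  rw [hxt, List.cons_append, PySem.List.max?_id_cons, hper r, hxt, PySem.List.max?_id_cons,
    PySem.List.max?_id_cons]
  simp only [Option.getD_some, List.foldl_append]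
  have := pv_flat_max f hfne rs
  rw [show rs.flatMap f = List.flatMap f rs from rfl] at *
  rw [this (t.foldl max x)]
  have hmm : ∀ (ms : List Int) (a : Int), ms.foldl max a = List.foldl max a ms := fun _ _ => rfl
  have key : (rs.map (fun r => (PySem.List.max? (f r) (fun y => y)).getD 0)).foldl max (t.foldl max x)
      = (rs.map longest_valid_run_alt).foldl max (t.foldl max x) := by
    congr 1
    exact (List.map_congr_left (fun r _ => (hper r).symm))
  rw [key]
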